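-- pv_equiv track=rewrite | github.com/WilliamPerezBeltran/studying_python | ejerciciso_daniel/11_encode_base10_to_base62.py | encode_base10_to_base62
-- ===== SOURCE A (Python) =====
-- def encode_base10_to_base62(number):
-- 	alphabet = "0123456789abcdefghijklmnopqrstuvwxyzABCDEFGHIJKLMNOPQRSTUVWXYZ"
-- 	arrayShortener = []
--
-- 	stringShortener = ''
--
-- 	while number > 0:
-- 		arrayShortener.append(str(number%62))
-- 		number = number//62
--
-- 	for x in reversed(arrayShortener):
-- 		stringShortener+=alphabet[int(x)]
--
-- 	return stringShortener
-- ===== SOURCE B (Python) =====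
-- def encode_base10_to_base62(number):
--     alphabet = "0123456789abcdefghijklmnopqrstuvwxyzABCDEFGHIJKLMNOPQRSTUVWXYZ"
--     if number <= 0:
--         return ''
--     return encode_base10_to_base62(number // 62) + alphabet[number % 62]
-- ===== Notes on version B (the rewrite author's own statement) =====
-- stated objective: simpler
-- what changed: Replaced the digit-collecting loop (with its str()/int() round-trip, intermediate list and reversal pass) by a direct recursion that emits digits most-significant-first via the call stack.
import Mathlib
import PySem

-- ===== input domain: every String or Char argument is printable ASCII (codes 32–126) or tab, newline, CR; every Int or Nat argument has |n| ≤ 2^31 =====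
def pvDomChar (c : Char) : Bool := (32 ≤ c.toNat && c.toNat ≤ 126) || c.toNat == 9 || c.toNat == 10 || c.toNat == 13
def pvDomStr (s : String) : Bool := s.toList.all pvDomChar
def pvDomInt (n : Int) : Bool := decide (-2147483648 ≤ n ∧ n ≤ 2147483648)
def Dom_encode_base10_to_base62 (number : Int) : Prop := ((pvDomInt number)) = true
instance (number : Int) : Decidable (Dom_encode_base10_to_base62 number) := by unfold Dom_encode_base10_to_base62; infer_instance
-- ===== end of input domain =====

-- B replaces A's digit-collecting loop (str()/int() round-trip, intermediate list, reversal pass) by a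
-- direct recursion emitting digits most-significant-first; return values proved equal on all inputs.

-- ===== PORT A =====
def pvAlphabetA : String := "0123456789abcdefghijklmnopqrstuvwxyzABCDEFGHIJKLMNOPQRSTUVWXYZ"

-- the while loop: collects str(number % 62) in append order
def pvADigits (number : Int) : List String :=
  if 0 < number then
    PySem.Int.toStr (PySem.Int.mod number 62) :: pvADigits (PySem.Int.floordiv number 62)
  else []
termination_by number.toNat
decreasing_by
  rw [PySem.Int.floordiv_eq_ediv_of_pos (by norm_num)]
  omega

-- body of the for loop: stringShortener += alphabet[int(x)]  (int(x) always parses and is in range,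
-- so the `none` branches are unreachable; they keep the PySem primitives total)
def pvStepA (s : String) (x : String) : String :=
  match PySem.Int.ofStr? x with
  | some i =>
    match PySem.Str.pyGet? pvAlphabetA i with
    | some c => s.push c
    | none => s
  | none => s

def encode_base10_to_base62 (number : Int) : String :=
  ((pvADigits number).reverse).foldl pvStepA ""

-- ===== PORT B =====
def pvAlphabetB : String := "0123456789abcdefghijklmnopqrstuvwxyzABCDEFGHIJKLMNOPQRSTUVWXYZ"

-- alphabet[number % 62]  (always in range, the `none` branch is unreachable)
def pvDigitB (i : Int) : String :=
  match PySem.Str.pyGet? pvAlphabetB i with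
  | some c => String.ofList [c]
  | none => ""

def encode_base10_to_base62_alt (number : Int) : String :=
  if number ≤ 0 then ""
  else
    encode_base10_to_base62_alt (PySem.Int.floordiv number 62) ++
      pvDigitB (PySem.Int.mod number 62)
termination_by number.toNat
decreasing_by
  rw [PySem.Int.floordiv_eq_ediv_of_pos (by norm_num)]
  omega

-- ===== PRECONDITION & SPEC =====
def Spec_encode_base10_to_base62 (number : Int) (out : String) : Prop := out = encode_base10_to_base62_alt number
instance (number : Int) (out : String) : Decidable (Spec_encode_base10_to_base62 number out) := by unfold Spec_encode_base10_to_base62; infer_instance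

-- ===== CLAIM (what is proved, stated in full; the proofs are below) =====
def Claim_equal_encode_base10_to_base62 : Prop := ∀ (number : Int), Dom_encode_base10_to_base62 number → Spec_encode_base10_to_base62 number (encode_base10_to_base62 number)

-- ===== LEMMAS AND PROOFS =====

-- one digit: A's step (str → int → alphabet index → push) appends exactly B's digit string
lemma pv_digit (i : Int) (h0 : 0 ≤ i) (h1 : i < 62) (s : String) :
    (pvStepA s (PySem.Int.toStr i)).toList = s.toList ++ (pvDigitB i).toList := by
  have hrt : ∀ m : Nat, m < 62 → PySem.Int.ofStr? (PySem.Int.toStr (m : Int)) = some (m : Int) := by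
    decide
  have hi : i = ((i.toNat : Nat) : Int) := by omega
  have hm : i.toNat < 62 := by omega
  rw [hi]
  simp only [pvStepA, pvDigitB, hrt i.toNat hm, PySem.Str.pyGet?_natCast]
  have hAB : pvAlphabetA.toList = pvAlphabetB.toList := by decide
  have hlen : pvAlphabetB.toList.length = 62 := by decide
  obtain ⟨c, hc⟩ : ∃ c, pvAlphabetB.toList[i.toNat]? = some c :=
    ⟨_, List.getElem?_eq_getElem (by omega)⟩
  rw [hAB, hc]
  simp

lemma pv_main (k : Nat) : ∀ n : Int, n.toNat ≤ k → ∀ s : String,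
    (((pvADigits n).reverse).foldl pvStepA s).toList
      = s.toList ++ (encode_base10_to_base62_alt n).toList := by
  induction k with
  | zero =>
    intro n hn s
    have hle : n ≤ 0 := by omega
    rw [pvADigits, if_neg (by omega), encode_base10_to_base62_alt, if_pos hle]
    simp
  | succ k ih =>
    intro n hn s
    by_cases h : 0 < n
    · have hdiv : PySem.Int.floordiv n 62 = n / 62 :=
        PySem.Int.floordiv_eq_ediv_of_pos (by norm_num)
      rw [pvADigits, if_pos h, encode_base10_to_base62_alt, if_neg (by omega)]
      rw [List.reverse_cons, List.foldl_append]
      have hrec : (PySem.Int.floordiv n 62).toNat ≤ k := by rw [hdiv]; omega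
      have hd := pv_digit (PySem.Int.mod n 62) (PySem.Int.mod_nonneg n (by norm_num))
        (PySem.Int.mod_lt n (by norm_num))
      simp only [List.foldl_cons, List.foldl_nil]
      rw [hd, ih _ hrec s]
      simp
    · have hle : n ≤ 0 := by omega
      rw [pvADigits, if_neg h, encode_base10_to_base62_alt, if_pos hle]
      simp

-- ===== VERDICT (by name: the statement is the Claim_ definition above) =====
theorem encode_base10_to_base62_spec : Claim_equal_encode_base10_to_base62 := by
  intro n _
  unfold Spec_encode_base10_to_base62
  apply String.toList_inj.mp
  have := pv_main n.toNat n le_rfl ""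
  simpa [encode_base10_to_base62] using this
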